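-- pv_equiv track=rewrite | github.com/leeMK09/leetcode | 1436-80-2529-maximum-count-of-positive-integer-and-negative-integer/1436-80-2529-maximum-count-of-positive-integer-and-negative-integer.py | binarySearchPos
-- ===== SOURCE A (Python) =====
-- from typing import List
--
-- def binarySearchPos(leftCount: int, nums: List[int]) -> int:
--     left = leftCount
--     right = len(nums) - 1
--
--     while left <= right:
--         mid = (left + right) // 2
--         if nums[mid] <= 0:
--             left = mid + 1
--         else:
--             right = mid - 1
--     return len(nums) - (right + 1)
-- ===== SOURCE B (Python) =====
-- from typing import List
--
-- def binarySearchPos(leftCount: int, nums: List[int]) -> int: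
--     n = len(nums)
--     if leftCount >= n:
--         return 0
--
--     def go(lo: int, m: int) -> int:
--         # m = size of the remaining search window starting at lo
--         if m == 0:
--             return n - lo
--         half = (m - 1) // 2
--         mid = lo + half
--         if nums[mid] <= 0:
--             return go(mid + 1, m - half - 1)
--         return go(lo, half)
--
--     return go(leftCount, n - leftCount)
-- ===== Notes on version B (the rewrite author's own statement) =====
-- stated objective: alternative
-- what changed: A's while-loop over a mutable (left,right) pair, deriving the answer from the final right after the loop, is replaced by structural recursion on the window SIZE (a natural number) with the midpoint offset from size//2 and the count returned directly at the empty-window base case.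
-- outside the precondition, e.g. on binarySearchPos(-2, [-5]): A returns 0, B returns 0
import Mathlib
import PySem

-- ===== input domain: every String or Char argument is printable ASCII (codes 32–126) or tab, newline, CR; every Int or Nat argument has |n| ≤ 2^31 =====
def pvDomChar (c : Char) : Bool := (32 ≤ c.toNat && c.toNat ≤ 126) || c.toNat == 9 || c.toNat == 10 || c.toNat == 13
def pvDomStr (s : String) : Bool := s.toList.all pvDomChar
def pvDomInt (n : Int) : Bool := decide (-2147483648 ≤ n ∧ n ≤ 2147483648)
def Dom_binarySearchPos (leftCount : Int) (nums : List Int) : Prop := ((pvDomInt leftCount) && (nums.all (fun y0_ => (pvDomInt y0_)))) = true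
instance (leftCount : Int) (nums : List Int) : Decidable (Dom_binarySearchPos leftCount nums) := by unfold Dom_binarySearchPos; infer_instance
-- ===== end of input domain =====

-- B replaces A's (left,right) while-loop, whose answer is derived from the final right
-- after the loop, by structural recursion on the SIZE of the search window (a Nat),
-- with the midpoint offset computed by Nat division and the count returned directly
-- at the empty-window base case; same comparison path, so the values agree.

-- ===== PORT A =====
-- A's while-loop: state (left, right), returns the final value of right;
-- none = IndexError from nums[mid].
def binarySearchPosLoop (nums : List Int) (left right : Int) : Option Int :=
  if hle : left ≤ right then
    match PySem.List.pyGet? nums (PySem.Int.floordiv (left + right) 2) with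
    | none => none
    | some v =>
      if v ≤ 0 then
        binarySearchPosLoop nums (PySem.Int.floordiv (left + right) 2 + 1) right
      else
        binarySearchPosLoop nums left (PySem.Int.floordiv (left + right) 2 - 1)
  else some right
termination_by (right + 1 - left).toNat
decreasing_by
  · have := PySem.Int.floordiv_two_mid_bounds hle; omega
  · have := PySem.Int.floordiv_two_mid_bounds hle; omega

def binarySearchPos (leftCount : Int) (nums : List Int) : Int :=
  match binarySearchPosLoop nums leftCount ((nums.length : Int) - 1) with
  | some right => (nums.length : Int) - (right + 1)
  | none => 0

-- ===== PORT B =====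
-- B's helper go: structural recursion on the window size m : Nat; the base case
-- (empty window at lo) yields the count n - lo directly.
def goPos (nums : List Int) (n lo : Int) : Nat → Option Int
  | 0 => some (n - lo)
  | t + 1 =>
    let half : Nat := t / 2
    let mid : Int := lo + (half : Int)
    match PySem.List.pyGet? nums mid with
    | none => none
    | some v =>
      if v ≤ 0 then goPos nums n (mid + 1) (t - half)
      else goPos nums n lo half
termination_by m => m
decreasing_by
  · omega
  · omega

def binarySearchPos_alt (leftCount : Int) (nums : List Int) : Int :=
  let n : Int := (nums.length : Int)
  if n ≤ leftCount then 0
  else (goPos nums n leftCount (n - leftCount).toNat).getD 0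

-- ===== PRECONDITION & SPEC =====
-- Pre_ excludes leftCount < -len(nums): there the search's midpoint can fall below
-- -len and both programs raise IndexError (on a value-dependent subset of such inputs
-- they happen to terminate normally, and then they still agree).
def Pre_binarySearchPos (leftCount : Int) (nums : List Int) : Prop :=
  -(nums.length : Int) ≤ leftCount
instance (leftCount : Int) (nums : List Int) : Decidable (Pre_binarySearchPos leftCount nums) := by
  unfold Pre_binarySearchPos; infer_instance

def pvWitness_binarySearchPos : Int × List Int := (1, [-3, -1, 2, 5])

def Spec_binarySearchPos (leftCount : Int) (nums : List Int) (out : Int) : Prop := out = binarySearchPos_alt leftCount nums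
instance (leftCount : Int) (nums : List Int) (out : Int) : Decidable (Spec_binarySearchPos leftCount nums out) := by unfold Spec_binarySearchPos; infer_instance

-- ===== CLAIM (what is proved, stated in full; the proofs are below) =====
def Claim_equal_binarySearchPos : Prop := ∀ (leftCount : Int) (nums : List Int), Dom_binarySearchPos leftCount nums → Pre_binarySearchPos leftCount nums → Spec_binarySearchPos leftCount nums (binarySearchPos leftCount nums)

-- ===== LEMMAS AND PROOFS =====

-- A's midpoint over a window [lo, lo+t] equals lo plus the Nat-division offset t/2.
lemma mid_eq (lo : Int) (t : Nat) :
    PySem.Int.floordiv (lo + (lo + (t : Int))) 2 = lo + ((t / 2 : Nat) : Int) := by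
  rw [PySem.Int.floordiv_eq_iff_of_pos (by norm_num)]
  constructor <;> omega

-- Under -n ≤ lo and a window fitting inside the list, A's loop over [lo, lo+m-1]
-- returns its final right r, and B's helper on the same window returns n - 1 - r.
lemma loop_go_rel (nums : List Int) :
    ∀ (k m : Nat) (lo : Int), m ≤ k →
    -(nums.length : Int) ≤ lo → lo + (m : Int) ≤ (nums.length : Int) →
    ∃ r, binarySearchPosLoop nums lo (lo + (m : Int) - 1) = some r ∧
      goPos nums (nums.length : Int) lo m = some ((nums.length : Int) - 1 - r) := by
  intro k
  induction k with
  | zero =>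
    intro m lo hk _ _
    have hm : m = 0 := by omega
    subst hm
    refine ⟨lo - 1, ?_, ?_⟩
    · rw [binarySearchPosLoop]; simp
    · simp [goPos]
  | succ k ih =>
    intro m lo hk hlo hhi
    cases m with
    | zero =>
      refine ⟨lo - 1, ?_, ?_⟩
      · rw [binarySearchPosLoop]; simp
      · simp [goPos]
    | succ t =>
      have hle : lo ≤ lo + ((t + 1 : Nat) : Int) - 1 := by push_cast; omega
      have hhieq : lo + ((t + 1 : Nat) : Int) - 1 = lo + (t : Int) := by push_cast; ring
      have hmid : PySem.Int.floordiv (lo + (lo + (t : Int))) 2 = lo + ((t / 2 : Nat) : Int) :=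
        mid_eq lo t
      set half : Nat := t / 2 with hhalf
      set mid : Int := lo + (half : Int) with hmiddef
      obtain ⟨v, hget⟩ : ∃ v, PySem.List.pyGet? nums mid = some v := by
        cases hh : PySem.List.pyGet? nums mid with
        | none =>
          exfalso
          rw [PySem.List.pyGet?_eq_none_iff] at hh
          simp [PySem.Raise.InRange] at hh
          omega
        | some v => exact ⟨v, rfl⟩
      by_cases hv : v ≤ 0
      · obtain ⟨r, h1, h2⟩ := ih (t - half) (mid + 1)
          (by omega) (by omega) (by push_cast; omega)
        refine ⟨r, ?_, ?_⟩
        · rw [binarySearchPosLoop]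
          rw [hhieq] at *
          simp only [show lo ≤ lo + (t : Int) by omega, dite_true, hmid, hget, hv,
            if_true]
          have : lo + (t : Int) = mid + 1 + ((t - half : Nat) : Int) - 1 := by
            push_cast; omega
          rw [this]; exact h1
        · rw [goPos]
          simp only [← hhalf, ← hmiddef, hget, hv, if_true]
          exact h2
      · obtain ⟨r, h1, h2⟩ := ih half lo (by omega) hlo (by push_cast; omega)
        refine ⟨r, ?_, ?_⟩
        · rw [binarySearchPosLoop]
          rw [hhieq]
          simp only [show lo ≤ lo + (t : Int) by omega, dite_true, hmid, hget, hv,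
            if_false]
          have : mid - 1 = lo + ((half : Nat) : Int) - 1 := by rw [hmiddef]
          rw [this]; exact h1
        · rw [goPos]
          simp only [← hhalf, ← hmiddef, hget, hv, if_false]
          exact h2

-- ===== VERDICT (by name: the statement is the Claim_ definition above) =====
theorem binarySearchPos_spec : Claim_equal_binarySearchPos := by
  intro leftCount nums _ hpre
  unfold Spec_binarySearchPos binarySearchPos binarySearchPos_alt
  by_cases hbig : (nums.length : Int) ≤ leftCount
  · rw [binarySearchPosLoop,
      dif_neg (show ¬ leftCount ≤ (nums.length : Int) - 1 by omega)]
    simp [hbig]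
  · have hm : leftCount + (((nums.length : Int) - leftCount).toNat : Int) - 1
        = (nums.length : Int) - 1 := by omega
    obtain ⟨r, h1, h2⟩ := loop_go_rel nums ((nums.length : Int) - leftCount).toNat
      ((nums.length : Int) - leftCount).toNat leftCount (le_refl _) hpre (by omega)
    rw [hm] at h1
    simp only [h1, h2, Option.getD_some, if_neg hbig]
    omega
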